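-- pv_equiv track=rewrite | github.com/openpa/openpa | app/api/tools.py | _escape_env_value
-- ===== SOURCE A (Python) =====
-- def _escape_env_value(value: str) -> str:
--     """Quote a value for safe inclusion in a ``.env`` file.
--
--     Wraps in double quotes and escapes embedded ``"`` / ``\\`` if the value
--     contains whitespace, ``#``, or quotes; otherwise returns it as-is.
--     """
--     if value == "":
--         return ""
--     needs_quoting = any(ch in value for ch in (" ", "\t", "\n", "\r", "#", '"', "'", "\\", "$"))
--     if not needs_quoting:
--         return value
--     escaped = value.replace("\\", "\\\\").replace('"', '\\"')
--     return f'"{escaped}"'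
-- ===== SOURCE B (Python) =====
-- def _escape_env_value(value: str) -> str:
--     """Single pass: build the escaped text and the needs-quoting flag together."""
--     escaped = []
--     needs_quoting = False
--     for ch in value:
--         if ch == "\\":
--             escaped.append("\\\\")
--         elif ch == '"':
--             escaped.append('\\"')
--         else:
--             escaped.append(ch)
--         if ch in ' \t\n\r#"\'\\$':
--             needs_quoting = True
--     if needs_quoting:
--         return '"' + "".join(escaped) + '"'
--     return value
-- ===== Notes on version B (the rewrite author's own statement) =====
-- stated objective: alternative
-- what changed: Replaces the nine separate substring-membership scans plus two whole-string replace passes with one single pass over the characters that builds the escaped text and the needs-quoting flag simultaneously.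
import Mathlib
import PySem

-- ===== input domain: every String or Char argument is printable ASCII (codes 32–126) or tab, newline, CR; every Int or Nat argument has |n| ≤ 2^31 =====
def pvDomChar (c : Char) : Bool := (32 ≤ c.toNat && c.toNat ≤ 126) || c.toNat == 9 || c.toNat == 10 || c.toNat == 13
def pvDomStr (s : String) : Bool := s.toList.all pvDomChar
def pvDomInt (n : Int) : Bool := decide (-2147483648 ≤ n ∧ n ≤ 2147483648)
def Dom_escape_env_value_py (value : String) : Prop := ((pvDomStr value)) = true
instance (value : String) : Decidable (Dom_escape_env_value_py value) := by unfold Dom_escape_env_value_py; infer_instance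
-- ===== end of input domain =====

-- B builds the escaped text and the needs-quoting flag in a single pass over the
-- characters, instead of nine substring scans followed by two replace passes.


-- ===== PORT A =====
def escape_env_value_py (value : String) : String :=
  if value = "" then ""
  else
    let needs_quoting :=
      ([" ", "\t", "\n", "\r", "#", "\"", "'", "\\", "$"].any
        (fun ch => PySem.Str.isIn ch value))
    if needs_quoting = false then value
    else
      let escaped := PySem.Str.replace (PySem.Str.replace value "\\" "\\\\") "\"" "\\\""
      String.ofList ('"' :: escaped.toList ++ ['"'])

-- ===== PORT B =====
def pvTriggers : List Char := [' ', '\t', '\n', '\r', '#', '"', '\'', '\\', '$']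

def pvEscChar (c : Char) : List Char :=
  if c = '\\' then ['\\', '\\'] else if c = '"' then ['\\', '"'] else [c]

def escape_env_value_py_alt (value : String) : String :=
  let res := value.toList.foldl
    (fun (acc : List Char × Bool) ch =>
      (acc.1 ++ pvEscChar ch, acc.2 || decide (ch ∈ pvTriggers))) ([], false)
  if res.2 then String.ofList ('"' :: res.1 ++ ['"']) else value

-- ===== PRECONDITION & SPEC =====
def Spec_escape_env_value_py (value : String) (out : String) : Prop := out = escape_env_value_py_alt value
instance (value : String) (out : String) : Decidable (Spec_escape_env_value_py value out) := by unfold Spec_escape_env_value_py; infer_instance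

-- ===== CLAIM (what is proved, stated in full; the proofs are below) =====
def Claim_equal_escape_env_value_py : Prop := ∀ (value : String), Dom_escape_env_value_py value → Spec_escape_env_value_py value (escape_env_value_py value)

-- ===== LEMMAS AND PROOFS =====

-- [c] is an infix of l exactly when c is a member.
theorem pv_singleton_infix_iff (c : Char) (l : List Char) : [c] <:+: l ↔ c ∈ l := by
  constructor
  · intro h; exact List.singleton_sublist.mp h.sublist
  · intro h
    obtain ⟨s, t, rfl⟩ := List.append_of_mem h
    exact ⟨s, t, by simp⟩

-- a single-char `in` test is membership
theorem pv_isIn_single (ch : String) (c : Char) (v : String) (h : ch.toList = [c]) :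
    PySem.Str.isIn ch v = decide (c ∈ v.toList) := by
  rw [Bool.eq_iff_iff]
  rw [PySem.Str.isIn_iff_infix, h, pv_singleton_infix_iff]
  simp

-- A's needs_quoting equals B's per-character trigger test
theorem pv_needs_eq (v : String) :
    ([" ", "\t", "\n", "\r", "#", "\"", "'", "\\", "$"].any
        (fun ch => PySem.Str.isIn ch v))
    = v.toList.any (fun c => decide (c ∈ pvTriggers)) := by
  rw [Bool.eq_iff_iff]
  simp only [List.any_cons, List.any_nil, Bool.or_eq_true, Bool.false_eq_true, or_false,
    pv_isIn_single " " ' ' v rfl, pv_isIn_single "\t" '\t' v rfl,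
    pv_isIn_single "\n" '\n' v rfl, pv_isIn_single "\r" '\r' v rfl,
    pv_isIn_single "#" '#' v rfl, pv_isIn_single "\"" '"' v rfl,
    pv_isIn_single "'" '\'' v rfl, pv_isIn_single "\\" '\\' v rfl,
    pv_isIn_single "$" '$' v rfl, List.any_eq_true, decide_eq_true_eq, pvTriggers,
    List.mem_cons, List.not_mem_nil, or_false]
  constructor
  · rintro (h|h|h|h|h|h|h|h|h) <;> exact ⟨_, h, by simp⟩
  · rintro ⟨c, hc, h⟩
    rcases h with rfl|rfl|rfl|rfl|rfl|rfl|rfl|rfl|rfl <;> simp [hc]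

-- replace with a one-character pattern is a flatMap
theorem pv_replace_go_single (o : Char) (rep : List Char) :
    ∀ (fuel : Nat) (l acc : List Char), l.length ≤ fuel →
      PySem.Chars.replace.go [o] rep fuel l acc
        = acc.reverse ++ l.flatMap (fun c => if c = o then rep else [c]) := by
  intro fuel
  induction fuel with
  | zero =>
    intro l acc h
    have : l = [] := List.length_eq_zero_iff.mp (Nat.le_zero.mp h)
    subst this
    simp [PySem.Chars.replace.go]
  | succ n ih =>
    intro l acc h
    cases l with
    | nil => simp [PySem.Chars.replace.go]
    | cons c t =>
      rw [PySem.Chars.replace.go]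
      by_cases hc : c = o
      · subst hc
        have hp : List.isPrefixOf [c] (c :: t) = true := by simp [List.isPrefixOf]
        simp only [hp, if_true]
        rw [show List.drop (List.length [c]) (c :: t) = t from rfl]
        rw [ih t (rep.reverse ++ acc) (by simpa using Nat.le_of_succ_le_succ h)]
        simp
      · have hp : List.isPrefixOf [o] (c :: t) = false := by
          simp only [List.isPrefixOf]
          simp only [Bool.and_eq_false_iff, beq_eq_false_iff_ne]
          exact Or.inl (fun h' => hc h'.symm)
        simp only [hp, Bool.false_eq_true, if_false]
        rw [ih t (c :: acc) (by simpa using Nat.le_of_succ_le_succ h)]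
        simp [hc]

theorem pv_replace_single (l : List Char) (o : Char) (rep : List Char) :
    PySem.Chars.replace l [o] rep = l.flatMap (fun c => if c = o then rep else [c]) := by
  rw [PySem.Chars.replace]
  simp only [List.isEmpty_cons, Bool.false_eq_true, if_false]
  rw [pv_replace_go_single o rep l.length l [] le_rfl]
  simp

-- the two replace passes combine into pvEscChar
theorem pv_escOne (c : Char) :
    ((if c = '\\' then ['\\', '\\'] else [c]).flatMap
      (fun d => if d = '"' then ['\\', '"'] else [d])) = pvEscChar c := by
  by_cases h1 : c = '\\'
  · subst h1; simp [pvEscChar]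
  · by_cases h2 : c = '"'
    · subst h2; simp [pvEscChar]
    · simp [h1, h2, pvEscChar]

-- B's fold computes (flatMap pvEscChar, any trigger)
theorem pv_foldl_escape (l : List Char) :
    ∀ (a : List Char) (b : Bool),
      l.foldl (fun (acc : List Char × Bool) ch =>
          (acc.1 ++ pvEscChar ch, acc.2 || decide (ch ∈ pvTriggers))) (a, b)
        = (a ++ l.flatMap pvEscChar, b || l.any (fun c => decide (c ∈ pvTriggers))) := by
  induction l with
  | nil => intro a b; simp
  | cons c t ih =>
    intro a b
    simp only [List.foldl_cons, ih, List.flatMap_cons, List.any_cons]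
    simp [List.append_assoc, Bool.or_assoc]

theorem escape_env_value_toList (v : String) :
    (PySem.Str.replace (PySem.Str.replace v "\\" "\\\\") "\"" "\\\"").toList
      = v.toList.flatMap pvEscChar := by
  rw [PySem.Str.toList_replace, PySem.Str.toList_replace]
  rw [show ("\\" : String).toList = ['\\'] from rfl,
      show ("\\\\" : String).toList = ['\\', '\\'] from rfl,
      show ("\"" : String).toList = ['"'] from rfl,
      show ("\\\"" : String).toList = ['\\', '"'] from rfl]
  rw [pv_replace_single, pv_replace_single, List.flatMap_assoc]
  exact List.flatMap_congr (fun c _ => pv_escOne c)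

-- ===== VERDICT (by name: the statement is the Claim_ definition above) =====
theorem escape_env_value_py_spec : Claim_equal_escape_env_value_py := by
  intro value _
  unfold Spec_escape_env_value_py escape_env_value_py escape_env_value_py_alt
  by_cases hv : value = ""
  · subst hv; rfl
  · rw [if_neg hv]
    simp only [pv_foldl_escape, List.nil_append, Bool.false_or]
    rw [pv_needs_eq]
    cases hq : value.toList.any (fun c => decide (c ∈ pvTriggers)) with
    | false => simp
    | true =>
      simp only [Bool.true_eq_false, if_false, if_true]
      rw [escape_env_value_toList]
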